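-- pv_equiv track=rewrite | github.com/Zaaachary/NLP-Model-Demo | RNN_Learning/GRU_Attention_Translator/PrepareData.py | sentences2idx
-- ===== SOURCE A (Python) =====
-- def sentences2idx(en_sentences, cn_sentences, en_word2idx, cn_word2idx, len_sort=False):
--     '''
--     transform word sentence 2 idx sentence, and sort by en
--     '''
--     length = len(en_sentences)
--     # word sentence 2 idx sentence
--     en_idx_sentences = [[en_word2idx.get(word, 0) for word in sentence] for sentence in en_sentences]
--     cn_idx_sentences = [[cn_word2idx.get(word, 0) for word in sentence] for sentence in cn_sentences]
--     # sort by len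
--     if len_sort:
--         sorted_index = sorted(range(length),
--             key=lambda index: len(en_idx_sentences[index])+len(cn_idx_sentences[index])
--             )
--         en_idx_sentences = [en_idx_sentences[index] for index in sorted_index]
--         cn_idx_sentences = [cn_idx_sentences[index] for index in sorted_index]
--     return en_idx_sentences, cn_idx_sentences
-- ===== SOURCE B (Python) =====
-- def sentences2idx(en_sentences, cn_sentences, en_word2idx, cn_word2idx, len_sort=False):
--     '''
--     transform word sentence 2 idx sentence, and sort by en
--     '''
--     en_idx_sentences = [[en_word2idx.get(word, 0) for word in sentence] for sentence in en_sentences]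
--     cn_idx_sentences = [[cn_word2idx.get(word, 0) for word in sentence] for sentence in cn_sentences]
--     if len_sort:
--         # bucket the sentence pairs by combined length, then walk buckets in key order
--         buckets = {}
--         for i in range(len(en_idx_sentences)):
--             pair = (en_idx_sentences[i], cn_idx_sentences[i])
--             buckets.setdefault(len(pair[0]) + len(pair[1]), []).append(pair)
--         en_out, cn_out = [], []
--         for k in sorted(buckets):
--             for e, c in buckets[k]:
--                 en_out.append(e)
--                 cn_out.append(c)
--         return en_out, cn_out
--     return en_idx_sentences, cn_idx_sentences
-- ===== Notes on version B (the rewrite author's own statement) =====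
-- stated objective: alternative
-- what changed: A sorts a permutation-index list with a comparison sort keyed by combined sentence length and replays it twice; B does a bucket (distribution) sort instead: it groups the (en,cn) pairs into a dict keyed by combined length, sorts only the distinct keys, and emits the buckets in increasing key order, which reproduces the stable sort exactly.
import Mathlib
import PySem

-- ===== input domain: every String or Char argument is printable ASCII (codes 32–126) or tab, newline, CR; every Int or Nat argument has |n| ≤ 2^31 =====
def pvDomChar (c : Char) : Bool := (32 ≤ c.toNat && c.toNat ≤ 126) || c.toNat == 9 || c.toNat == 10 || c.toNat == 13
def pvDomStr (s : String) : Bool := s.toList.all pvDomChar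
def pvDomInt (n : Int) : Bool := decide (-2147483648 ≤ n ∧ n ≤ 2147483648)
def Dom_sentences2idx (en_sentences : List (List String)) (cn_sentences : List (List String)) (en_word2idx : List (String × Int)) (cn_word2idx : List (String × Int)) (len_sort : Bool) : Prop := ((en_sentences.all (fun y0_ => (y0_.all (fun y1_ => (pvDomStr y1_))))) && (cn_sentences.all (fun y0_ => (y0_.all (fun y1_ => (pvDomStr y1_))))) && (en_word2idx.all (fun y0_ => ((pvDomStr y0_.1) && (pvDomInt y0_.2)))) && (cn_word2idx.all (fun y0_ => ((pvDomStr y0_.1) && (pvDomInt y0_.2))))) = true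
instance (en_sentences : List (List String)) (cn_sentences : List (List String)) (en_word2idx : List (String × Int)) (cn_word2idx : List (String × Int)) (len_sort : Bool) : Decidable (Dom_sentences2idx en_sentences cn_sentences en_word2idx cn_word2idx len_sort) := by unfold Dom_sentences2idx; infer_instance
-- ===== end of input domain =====

-- B replaces A's comparison sort over a permutation-index list by a bucket (distribution) sort:
-- pairs are grouped into a dict keyed by combined length and emitted in increasing key order
-- (only the distinct keys are sorted); return values agree on Pre_.

-- ===== PORT A =====
def sentences2idx (en_sentences : List (List String)) (cn_sentences : List (List String)) (en_word2idx : List (String × Int)) (cn_word2idx : List (String × Int)) (len_sort : Bool) : List (List Int) × List (List Int) :=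
  let length : Int := en_sentences.length
  let en_idx_sentences := en_sentences.map (fun sentence => sentence.map (fun word => PySem.Dict.getD (PySem.Dict.ofList en_word2idx) word 0))
  let cn_idx_sentences := cn_sentences.map (fun sentence => sentence.map (fun word => PySem.Dict.getD (PySem.Dict.ofList cn_word2idx) word 0))
  if len_sort then
    let sorted_index := PySem.List.sorted (PySem.List.pyRange 0 length)
      (fun index => ((PySem.List.pyGetD en_idx_sentences index []).length : Int) + ((PySem.List.pyGetD cn_idx_sentences index []).length : Int))
    (sorted_index.map (fun index => PySem.List.pyGetD en_idx_sentences index []),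
     sorted_index.map (fun index => PySem.List.pyGetD cn_idx_sentences index []))
  else
    (en_idx_sentences, cn_idx_sentences)

-- ===== PORT B =====
def sentences2idx_alt (en_sentences : List (List String)) (cn_sentences : List (List String)) (en_word2idx : List (String × Int)) (cn_word2idx : List (String × Int)) (len_sort : Bool) : List (List Int) × List (List Int) :=
  let en_idx_sentences := en_sentences.map (fun sentence => sentence.map (fun word => PySem.Dict.getD (PySem.Dict.ofList en_word2idx) word 0))
  let cn_idx_sentences := cn_sentences.map (fun sentence => sentence.map (fun word => PySem.Dict.getD (PySem.Dict.ofList cn_word2idx) word 0))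
  if len_sort then
    -- buckets.setdefault(len(pair[0]) + len(pair[1]), []).append(pair)
    let buckets := (PySem.List.pyRange 0 (en_idx_sentences.length : Int)).foldl
      (fun d i =>
        let pair := (PySem.List.pyGetD en_idx_sentences i [], PySem.List.pyGetD cn_idx_sentences i [])
        PySem.Dict.modify d ((pair.1.length : Int) + (pair.2.length : Int)) [] (fun b => b ++ [pair]))
      PySem.Dict.empty
    -- for k in sorted(buckets): for e, c in buckets[k]: append to both outputs
    (PySem.List.sorted (PySem.Dict.keys buckets) (fun k => k)).foldl
      (fun out k => (PySem.Dict.getD buckets k []).foldl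
        (fun out2 p => (out2.1 ++ [p.1], out2.2 ++ [p.2])) out)
      ([], [])
  else
    (en_idx_sentences, cn_idx_sentences)

-- ===== PRECONDITION & SPEC =====
-- Pre_ excludes exactly the inputs where Python A raises IndexError: len_sort with cn_sentences shorter
-- than en_sentences (the sort key indexes cn_idx_sentences by range(len(en_sentences))); B raises there too.
def Pre_sentences2idx (en_sentences : List (List String)) (cn_sentences : List (List String)) (en_word2idx : List (String × Int)) (cn_word2idx : List (String × Int)) (len_sort : Bool) : Prop :=
  len_sort = true → en_sentences.length ≤ cn_sentences.length
instance (en_sentences : List (List String)) (cn_sentences : List (List String)) (en_word2idx : List (String × Int)) (cn_word2idx : List (String × Int)) (len_sort : Bool) : Decidable (Pre_sentences2idx en_sentences cn_sentences en_word2idx cn_word2idx len_sort) := by unfold Pre_sentences2idx; infer_instance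

def pvWitness_sentences2idx : List (List String) × List (List String) × (List (String × Int)) × (List (String × Int)) × Bool :=
  ([["hi", "there"], ["a"]], [["ni", "hao"], ["b"]], [("hi", 1), ("there", 2)], [("ni", 3)], true)

def Spec_sentences2idx (en_sentences : List (List String)) (cn_sentences : List (List String)) (en_word2idx : List (String × Int)) (cn_word2idx : List (String × Int)) (len_sort : Bool) (out : List (List Int) × List (List Int)) : Prop := out = sentences2idx_alt en_sentences cn_sentences en_word2idx cn_word2idx len_sort
instance (en_sentences : List (List String)) (cn_sentences : List (List String)) (en_word2idx : List (String × Int)) (cn_word2idx : List (String × Int)) (len_sort : Bool) (out : List (List Int) × List (List Int)) : Decidable (Spec_sentences2idx en_sentences cn_sentences en_word2idx cn_word2idx len_sort out) := by unfold Spec_sentences2idx; infer_instance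

-- ===== CLAIM (what is proved, stated in full; the proofs are below) =====
def Claim_equal_sentences2idx : Prop := ∀ (en_sentences : List (List String)) (cn_sentences : List (List String)) (en_word2idx : List (String × Int)) (cn_word2idx : List (String × Int)) (len_sort : Bool), Dom_sentences2idx en_sentences cn_sentences en_word2idx cn_word2idx len_sort → Pre_sentences2idx en_sentences cn_sentences en_word2idx cn_word2idx len_sort → Spec_sentences2idx en_sentences cn_sentences en_word2idx cn_word2idx len_sort (sentences2idx en_sentences cn_sentences en_word2idx cn_word2idx len_sort)

-- ===== LEMMAS AND PROOFS =====

-- ---- A side: sorting indices by the key of the indexed pair = mapping the sorted pair list ----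

-- mapping a function through insertBy, when the comparison on images agrees with the one on sources
theorem pv_map_insertBy {α β : Type} (f : α → β) (bA : α → α → Bool) (bB : β → β → Bool)
    (h : ∀ a c, bB (f a) (f c) = bA a c) (x : α) (l : List α) :
    (PySem.List.insertBy bA x l).map f = PySem.List.insertBy bB (f x) (l.map f) := by
  induction l with
  | nil => simp [PySem.List.insertBy]
  | cons y ys ih =>
    simp only [PySem.List.insertBy, List.map, h]
    by_cases hb : bA x y
    · simp [hb]
    · simp [hb, ih]

theorem pv_map_foldl_insertBy {α β : Type} (f : α → β) (bA : α → α → Bool) (bB : β → β → Bool)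
    (h : ∀ a c, bB (f a) (f c) = bA a c) (l acc : List α) :
    (l.foldl (fun acc x => PySem.List.insertBy bA x acc) acc).map f
      = (l.map f).foldl (fun acc y => PySem.List.insertBy bB y acc) (acc.map f) := by
  induction l generalizing acc with
  | nil => rfl
  | cons x xs ih => simpa [pv_map_insertBy f bA bB h] using ih (PySem.List.insertBy bA x acc)

-- sorting a mapped list with key kB = mapping the list sorted with key kB ∘ f
theorem pv_sorted_map {α β : Type} (f : α → β) (kB : β → Int) (l : List α) :
    PySem.List.sorted (l.map f) kB = (PySem.List.sorted l (fun a => kB (f a))).map f := by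
  rw [PySem.List.sorted_eq_foldl_insertBy, PySem.List.sorted_eq_foldl_insertBy]
  exact (pv_map_foldl_insertBy f _ _ (fun a c => rfl) l []).symm

-- ---- stable sort = buckets in increasing key order ----

-- the group of elements of l whose key is k, in order
def pvGroup {α : Type} (f : α → Int) (l : List α) (k : Int) : List α :=
  l.filter (fun p => f p == k)

-- the distinct keys of l in increasing order
def pvKeys {α : Type} (f : α → Int) (l : List α) : List Int :=
  PySem.List.sorted (PySem.Set.ofList (l.map f)) (fun k => k)

theorem pv_insertBy_skip {α : Type} (b : α → α → Bool) (x : α) (ys zs : List α)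
    (h : ∀ y ∈ ys, b x y = false) :
    PySem.List.insertBy b x (ys ++ zs) = ys ++ PySem.List.insertBy b x zs := by
  induction ys with
  | nil => rfl
  | cons y ys ih =>
    have hy : b x y = false := h y (by simp)
    have hstep : PySem.List.insertBy b x (y :: (ys ++ zs))
        = if b x y then x :: y :: (ys ++ zs) else y :: PySem.List.insertBy b x (ys ++ zs) := rfl
    simp only [List.cons_append, hstep, hy, Bool.false_eq_true, if_false,
      ih (fun y hm => h y (List.mem_cons_of_mem _ hm))]

theorem pv_insertBy_front {α : Type} (b : α → α → Bool) (x : α) (zs : List α)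
    (h : ∀ y ∈ zs, b x y = true) :
    PySem.List.insertBy b x zs = x :: zs := by
  cases zs with
  | nil => rfl
  | cons z zs => simp [PySem.List.insertBy, h z (by simp)]

theorem pv_mem_group_key {α : Type} (f : α → Int) (l : List α) (k : Int) (p : α)
    (h : p ∈ pvGroup f l k) : f p = k := by
  have := List.of_mem_filter h
  simpa using this

-- inserting x whose key is already a bucket key: it lands at the end of its bucket
theorem pv_insert_mem {α : Type} (f : α → Int) (x : α) (l : List α) (ks : List Int)
    (hpw : ks.Pairwise (· < ·)) (hm : f x ∈ ks) :
    PySem.List.insertBy (fun a b => decide (f a < f b)) x (ks.flatMap (pvGroup f l))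
      = ks.flatMap (fun k => pvGroup f l k ++ if f x == k then [x] else []) := by
  induction ks with
  | nil => simp at hm
  | cons k ks ih =>
    rw [List.pairwise_cons] at hpw
    obtain ⟨hk, hpw'⟩ := hpw
    rcases List.mem_cons.mp hm with hkx | hkx
    · -- f x = k : skip the k-bucket, then x goes in front of the rest
      have hskip : ∀ y ∈ pvGroup f l k, decide (f x < f y) = false := by
        intro y hy
        have hfy := pv_mem_group_key f l k y hy
        simp [hfy, hkx]
      have hfront : ∀ y ∈ ks.flatMap (pvGroup f l), decide (f x < f y) = true := by
        intro y hy
        obtain ⟨k', hk', hy'⟩ := List.mem_flatMap.mp hy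
        have hfy := pv_mem_group_key f l k' y hy'
        have hlt : f x < f y := by rw [hfy, hkx]; exact hk k' hk'
        simp [hlt]
      have hdead : ks.flatMap (fun k' => pvGroup f l k' ++ if f x == k' then [x] else [])
          = ks.flatMap (pvGroup f l) := by
        apply List.flatMap_congr
        intro k' hk'
        have h1 : k < k' := hk k' hk'
        have h2 : f x ≠ k' := by omega
        simp [h2]
      rw [List.flatMap_cons, List.flatMap_cons, hdead,
        pv_insertBy_skip _ _ _ _ hskip, pv_insertBy_front _ _ _ hfront]
      simp [hkx]
    · -- f x ∈ ks, so k < f x : skip the k-bucket and recurse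
      have hklt : k < f x := hk _ hkx
      have hskip : ∀ y ∈ pvGroup f l k, decide (f x < f y) = false := by
        intro y hy
        have hfy := pv_mem_group_key f l k y hy
        simp [hfy]; omega
      have hne : f x ≠ k := by omega
      rw [List.flatMap_cons, List.flatMap_cons,
        pv_insertBy_skip _ _ _ _ hskip, ih hpw' hkx]
      simp [hne]

theorem pv_insert_not_mem {α : Type} (f : α → Int) (x : α) (l : List α) (ks : List Int)
    (hpw : ks.Pairwise (· < ·)) (hm : f x ∉ ks) (hg : pvGroup f l (f x) = []) :
    PySem.List.insertBy (fun a b => decide (f a < f b)) x (ks.flatMap (pvGroup f l))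
      = (PySem.List.insertBy (fun a b => decide (a < b)) (f x) ks).flatMap
          (fun k => pvGroup f l k ++ if f x == k then [x] else []) := by
  induction ks with
  | nil => simp [PySem.List.insertBy, hg]
  | cons k ks ih =>
    rw [List.pairwise_cons] at hpw
    obtain ⟨hk, hpw'⟩ := hpw
    have hne : f x ≠ k := fun h => hm (by simp [h])
    have hstep : PySem.List.insertBy (fun a b => decide (a < b)) (f x) (k :: ks)
        = if decide (f x < k) then f x :: k :: ks
          else k :: PySem.List.insertBy (fun a b => decide (a < b)) (f x) ks := rfl
    by_cases hlt : f x < k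
    · -- every bucket key is > f x : x goes in front and so does its key
      have hfront : ∀ y ∈ (k :: ks).flatMap (pvGroup f l), decide (f x < f y) = true := by
        intro y hy
        obtain ⟨k', hk', hy'⟩ := List.mem_flatMap.mp hy
        have hfy := pv_mem_group_key f l k' y hy'
        have hlt2 : f x < f y := by
          rcases List.mem_cons.mp hk' with h | h
          · rw [hfy, h]; exact hlt
          · have := hk k' h; omega
        simp [hlt2]
      have hdead : ∀ k' ∈ k :: ks,
          (pvGroup f l k' ++ if f x == k' then [x] else []) = pvGroup f l k' := by
        intro k' hk'
        have h2 : f x ≠ k' := by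
          rcases List.mem_cons.mp hk' with h | h
          · omega
          · have := hk k' h; omega
        simp [h2]
      rw [pv_insertBy_front _ _ _ hfront, hstep]
      simp only [hlt, decide_true, if_true, List.flatMap_cons, hg, List.nil_append,
        List.flatMap_congr hdead]
      simp
    · -- k < f x : skip the k-bucket and recurse
      have hklt : k < f x := by omega
      have hskip : ∀ y ∈ pvGroup f l k, decide (f x < f y) = false := by
        intro y hy
        have hfy := pv_mem_group_key f l k y hy
        simp [hfy]; omega
      rw [List.flatMap_cons, pv_insertBy_skip _ _ _ _ hskip,
        ih hpw' (fun h => hm (List.mem_cons_of_mem _ h)), hstep]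
      have hlt' : decide (f x < k) = false := by simp [hlt]
      simp [hlt', List.flatMap_cons, hne]

theorem pv_sorted_snoc {α : Type} (l : List α) (x : α) (key : α → Int) :
    PySem.List.sorted (l ++ [x]) key
      = PySem.List.insertBy (fun a b => decide (key a < key b)) x (PySem.List.sorted l key) := by
  rw [PySem.List.sorted_eq_foldl_insertBy, PySem.List.sorted_eq_foldl_insertBy, List.foldl_append]
  rfl

theorem pv_ofList_snoc {α : Type} [BEq α] (ys : List α) (a : α) :
    PySem.Set.ofList (ys ++ [a]) = PySem.Set.add (PySem.Set.ofList ys) a := by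
  simp [PySem.Set.ofList, List.foldl_append]

theorem pv_group_snoc {α : Type} (f : α → Int) (l : List α) (x : α) (k : Int) :
    pvGroup f (l ++ [x]) k = pvGroup f l k ++ if f x == k then [x] else [] := by
  simp [pvGroup, List.filter_append, List.filter_cons]

-- stable sort by an Int key = concatenation of the key buckets in increasing key order
theorem pv_stable_group {α : Type} (f : α → Int) (l : List α) :
    PySem.List.sorted l f = (pvKeys f l).flatMap (pvGroup f l) := by
  induction l using List.reverseRecOn with
  | nil => rfl
  | append_singleton l x ih =>
    rw [pv_sorted_snoc, ih]
    have hkeys : pvKeys f (l ++ [x])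
        = PySem.List.sorted (PySem.Set.add (PySem.Set.ofList (l.map f)) (f x)) (fun k => k) := by
      simp [pvKeys, List.map_append, pv_ofList_snoc]
    have hpw : (pvKeys f l).Pairwise (· < ·) := PySem.List.sorted_ofList_pairwise_lt _
    have hgroups : (pvKeys f (l ++ [x])).flatMap (pvGroup f (l ++ [x]))
        = (pvKeys f (l ++ [x])).flatMap (fun k => pvGroup f l k ++ if f x == k then [x] else []) := by
      apply List.flatMap_congr
      intro k _
      exact pv_group_snoc f l x k
    rw [hgroups]
    by_cases hm : f x ∈ l.map f
    · have hadd : PySem.Set.add (PySem.Set.ofList (l.map f)) (f x) = PySem.Set.ofList (l.map f) := by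
        have : PySem.Set.contains (PySem.Set.ofList (l.map f)) (f x) = true := by
          simp only [PySem.Set.contains, List.contains_iff_mem]
          exact (PySem.Set.mem_ofList (l.map f) (f x)).mpr hm
        simp only [PySem.Set.add, this, if_true]
      have hks : pvKeys f (l ++ [x]) = pvKeys f l := by rw [hkeys, hadd]; rfl
      rw [hks]
      have hmem : f x ∈ pvKeys f l := by
        rw [pvKeys, PySem.List.mem_sorted]
        exact (PySem.Set.mem_ofList _ _).mpr hm
      exact pv_insert_mem f x l (pvKeys f l) hpw hmem
    · have hc : PySem.Set.contains (PySem.Set.ofList (l.map f)) (f x) = false := by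
        apply Bool.eq_false_iff.mpr
        intro hTrue
        have hmem : f x ∈ PySem.Set.ofList (l.map f) := by
          simpa only [PySem.Set.contains, List.contains_iff_mem] using hTrue
        exact hm ((PySem.Set.mem_ofList (l.map f) (f x)).mp hmem)
      have hks : pvKeys f (l ++ [x])
          = PySem.List.insertBy (fun a b => decide (a < b)) (f x) (pvKeys f l) := by
        rw [hkeys]
        simp only [PySem.Set.add, hc, if_neg Bool.false_ne_true]
        exact pv_sorted_snoc _ _ _
      rw [hks]
      have hmem : f x ∉ pvKeys f l := by
        rw [pvKeys, PySem.List.mem_sorted]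
        intro h
        exact hm ((PySem.Set.mem_ofList _ _).mp h)
      have hg : pvGroup f l (f x) = [] := by
        rw [pvGroup, List.filter_eq_nil_iff]
        intro p hp
        simp
        intro h
        exact hm (h ▸ List.mem_map_of_mem hp)
      exact pv_insert_not_mem f x l (pvKeys f l) hpw hmem hg

-- ---- B side: the bucket dict and the output loop in closed form ----

theorem pv_out_fold (g : Int → List (List Int × List Int)) (ks : List Int)
    (acc : List (List Int) × List (List Int)) :
    ks.foldl (fun out k => (g k).foldl (fun out2 p => (out2.1 ++ [p.1], out2.2 ++ [p.2])) out) acc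
      = (acc.1 ++ (ks.flatMap g).map Prod.fst, acc.2 ++ (ks.flatMap g).map Prod.snd) := by
  induction ks generalizing acc with
  | nil => simp
  | cons k ks ih =>
    obtain ⟨a, b⟩ := acc
    rw [List.foldl_cons,
      PySem.List.foldl_prod_mk (f := fun (s : List (List Int)) (e : List Int × List Int) => s ++ [e.1])
        (g := fun (s : List (List Int)) (e : List Int × List Int) => s ++ [e.2]),
      PySem.List.foldl_append_singleton_eq_map, PySem.List.foldl_append_singleton_eq_map, ih]
    simp

theorem pv_buckets_getD (keyf : (List Int × List Int) → Int) (l : List (List Int × List Int)) (k : Int) :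
    PySem.Dict.getD
      (l.foldl (fun d p => PySem.Dict.modify d (keyf p) [] (fun b => b ++ [p])) PySem.Dict.empty) k []
      = pvGroup keyf l k := by
  have h : l.foldl (fun d p => PySem.Dict.modify d (keyf p) [] (fun b => b ++ [p])) PySem.Dict.empty
      = (l.map (fun p => (keyf p, p))).foldl (fun d q => PySem.Dict.modify d q.1 [] (fun b => b ++ [q.2])) PySem.Dict.empty := by
    rw [List.foldl_map]
  rw [h, PySem.Dict.getD_foldl_modify_append, List.filter_map]
  simp [pvGroup, List.map_map, Function.comp_def]

theorem pv_buckets_keys (keyf : (List Int × List Int) → Int) (l : List (List Int × List Int)) :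
    PySem.Dict.keys
      (l.foldl (fun d p => PySem.Dict.modify d (keyf p) [] (fun b => b ++ [p])) PySem.Dict.empty)
      = PySem.Set.ofList (l.map keyf) := by
  rw [PySem.Dict.keys_foldl_modify_key l keyf [] (fun _ p b => b ++ [p]) PySem.Dict.empty]
  simp [PySem.Dict.keys_empty, PySem.Set.update, PySem.Set.ofList]

-- ===== VERDICT (by name: the statement is the Claim_ definition above) =====
theorem sentences2idx_spec : Claim_equal_sentences2idx := by
  intro en cn ew cw ls _ _
  unfold Spec_sentences2idx sentences2idx sentences2idx_alt
  cases ls with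
  | false => rfl
  | true =>
    simp only [List.length_map, if_true]
    set enI := en.map (fun s => s.map (fun w => PySem.Dict.getD (PySem.Dict.ofList ew) w 0)) with henI
    set cnI := cn.map (fun s => s.map (fun w => PySem.Dict.getD (PySem.Dict.ofList cw) w 0)) with hcnI
    set pairfn := fun i : Int => (PySem.List.pyGetD enI i [], PySem.List.pyGetD cnI i []) with hpair
    set keyf := fun p : List Int × List Int => ((p.1.length : Int) + (p.2.length : Int)) with hkey
    set pairs := (PySem.List.pyRange 0 (en.length : Int)).map pairfn with hpairs
    -- A side: A = (sorted pairs keyf).map fst, .map snd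
    have hA : PySem.List.sorted pairs keyf
        = (PySem.List.sorted (PySem.List.pyRange 0 (en.length : Int))
            (fun i => ((PySem.List.pyGetD enI i []).length : Int) + ((PySem.List.pyGetD cnI i []).length : Int))).map pairfn := by
      rw [hpairs, pv_sorted_map pairfn keyf]
    -- B side: the buckets walk = (sorted pairs keyf).map fst, .map snd
    have hbuck : (PySem.List.pyRange 0 (en.length : Int)).foldl
        (fun d i => PySem.Dict.modify d (keyf (pairfn i)) [] (fun b => b ++ [pairfn i])) PySem.Dict.empty
        = pairs.foldl (fun d p => PySem.Dict.modify d (keyf p) [] (fun b => b ++ [p])) PySem.Dict.empty := by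
      rw [hpairs, List.foldl_map]
    have hB : (PySem.List.sorted (PySem.Dict.keys
          (pairs.foldl (fun d p => PySem.Dict.modify d (keyf p) [] (fun b => b ++ [p])) PySem.Dict.empty)) (fun k => k)).foldl
        (fun out k => (PySem.Dict.getD
            (pairs.foldl (fun d p => PySem.Dict.modify d (keyf p) [] (fun b => b ++ [p])) PySem.Dict.empty) k []).foldl
          (fun out2 p => (out2.1 ++ [p.1], out2.2 ++ [p.2])) out) ([], [])
        = ((PySem.List.sorted pairs keyf).map Prod.fst, (PySem.List.sorted pairs keyf).map Prod.snd) := by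
      have h1 : ∀ ks : List Int, ks.foldl
          (fun out k => (PySem.Dict.getD
              (pairs.foldl (fun d p => PySem.Dict.modify d (keyf p) [] (fun b => b ++ [p])) PySem.Dict.empty) k []).foldl
            (fun out2 p => (out2.1 ++ [p.1], out2.2 ++ [p.2])) out) ([], [])
          = ks.foldl (fun out k => (pvGroup keyf pairs k).foldl
            (fun out2 p => (out2.1 ++ [p.1], out2.2 ++ [p.2])) out) ([], []) := by
        intro ks
        apply PySem.List.foldl_congr_mem
        intro acc k _
        rw [pv_buckets_getD]
      rw [h1, pv_buckets_keys, pv_out_fold]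
      rw [pv_stable_group keyf pairs]
      simp [pvKeys]
    rw [hbuck, hB, hA]
    simp only [List.map_map, Function.comp_def, Prod.mk.injEq]
    constructor <;> (apply List.map_congr_left; intro a _; simp [hpair])
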